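-- pv_equiv track=rewrite | github.com/Mikecraft1224/EiP-WiSe2024 | Blatt 05/HeavyMetalUmlaute_noDictionary.py | translateToHeavyMetalSplitted
-- ===== SOURCE A (Python) =====
-- def translateToHeavyMetalSplitted(s: str):
--     counterA = 0
--     counterO = 0
--     counterU = 0
--     translated = False
--
--     out = ""
--
--     for c in s:
--         if not translated and c in "aA":
--             counterA += 1
--             if counterA == 2:
--                 c = "ä" if c == "a" else "Ä"
--                 translated = True
--         elif not translated and c in "oO":
--             counterO += 1
--             if counterO == 2:
--                 c = "ö" if c == "o" else "Ö"
--                 translated = True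
--         elif not translated and c in "uU":
--             counterU += 1
--             if counterU == 2:
--                 c = "ü" if c == "u" else "Ü"
--                 translated = True
--         else:
--             if c == " ":
--                 translated = False
--                 counterA = 0
--                 counterO = 0
--                 counterU = 0
--
--         out += c
--
--     return out
-- ===== SOURCE B (Python) =====
-- def _umlaut(c):
--     if c == 'a': return 'ä'
--     if c == 'A': return 'Ä'
--     if c == 'o': return 'ö'
--     if c == 'O': return 'Ö'
--     if c == 'u': return 'ü'
--     return 'Ü'
--
--
-- def _occ(w, lo, up, need):
--     """Index and character of the need-th occurrence of the vowel family {lo, up} in w, else None."""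
--     cnt = 0
--     for i, c in enumerate(w):
--         if c == lo or c == up:
--             cnt += 1
--             if cnt == need:
--                 return (i, c)
--     return None
--
--
-- def _translateWord(w):
--     hits = [h for h in (_occ(w, 'a', 'A', 2), _occ(w, 'o', 'O', 2), _occ(w, 'u', 'U', 2)) if h is not None]
--     if not hits:
--         return w
--     i, c = min(hits)  # earliest second occurrence wins
--     return w[:i] + _umlaut(c) + w[i + 1:]
--
--
-- def translateToHeavyMetalSplitted(s: str):
--     return ' '.join(_translateWord(w) for w in s.split(' '))
-- ===== Notes on version B (the rewrite author's own statement) =====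
-- stated objective: alternative
-- what changed: Replaces A's single stateful character loop (three counters plus a translated flag reset at word boundaries) by splitting the string into space-separated words and rejoining them, translating each word independently: find the earliest second occurrence among the three vowel families and substitute the umlaut at that index via slicing.
import Mathlib
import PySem

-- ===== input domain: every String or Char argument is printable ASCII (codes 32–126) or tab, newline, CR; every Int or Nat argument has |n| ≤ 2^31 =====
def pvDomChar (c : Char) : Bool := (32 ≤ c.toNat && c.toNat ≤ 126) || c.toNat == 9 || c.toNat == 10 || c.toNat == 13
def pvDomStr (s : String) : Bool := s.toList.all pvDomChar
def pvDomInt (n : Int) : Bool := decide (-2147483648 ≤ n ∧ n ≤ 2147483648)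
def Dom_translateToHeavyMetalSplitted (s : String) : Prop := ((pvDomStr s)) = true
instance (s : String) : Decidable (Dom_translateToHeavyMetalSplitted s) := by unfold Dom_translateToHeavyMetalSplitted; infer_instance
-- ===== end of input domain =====

-- B splits on ' ' and rejoins with ' ' (exact inverse), translating each word by locating the
-- earliest second occurrence of a vowel family and substituting once — replacing A's stateful
-- counter+flag character loop; objective: alternative decomposition, same cost.

-- ===== PORT A =====
-- state = (counterA, counterO, counterU, translated, out); one step of A's for-loop body
def pvStepA (st : Int × Int × Int × Bool × List Char) (c : Char) : Int × Int × Int × Bool × List Char :=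
  match st with
  | (cA, cO, cU, tr, out) =>
    if tr = false ∧ (c = 'a' ∨ c = 'A') then
      if cA + 1 = 2 then (cA + 1, cO, cU, true, out ++ [if c = 'a' then 'ä' else 'Ä'])
      else (cA + 1, cO, cU, tr, out ++ [c])
    else if tr = false ∧ (c = 'o' ∨ c = 'O') then
      if cO + 1 = 2 then (cA, cO + 1, cU, true, out ++ [if c = 'o' then 'ö' else 'Ö'])
      else (cA, cO + 1, cU, tr, out ++ [c])
    else if tr = false ∧ (c = 'u' ∨ c = 'U') then
      if cU + 1 = 2 then (cA, cO, cU + 1, true, out ++ [if c = 'u' then 'ü' else 'Ü'])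
      else (cA, cO, cU + 1, tr, out ++ [c])
    else
      if c = ' ' then (0, 0, 0, false, out ++ [c])
      else (cA, cO, cU, tr, out ++ [c])

def translateToHeavyMetalSplitted (s : String) : String :=
  String.mk (s.toList.foldl pvStepA (0, 0, 0, false, ([] : List Char))).2.2.2.2

-- ===== PORT B =====
-- _umlaut: the early-return chain of Source B
def pvUmlaut (c : Char) : Char :=
  if c = 'a' then 'ä' else if c = 'A' then 'Ä' else if c = 'o' then 'ö'
  else if c = 'O' then 'Ö' else if c = 'u' then 'ü' else 'Ü'

-- _occ(w, lo, up, need): the enumerate loop, with the running count `cnt` and index `i` as accumulators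
def pvOcc (lo up : Char) (need cnt i : Nat) : List Char → Option (Nat × Char)
  | [] => none
  | c :: cs =>
    if c = lo ∨ c = up then
      if cnt + 1 = need then some (i, c)
      else pvOcc lo up need (cnt + 1) (i + 1) cs
    else pvOcc lo up need cnt (i + 1) cs

-- Python's min on pairs: lexicographic, the FIRST minimal element is kept (strict-less replaces)
def pvLexMin (b x : Nat × Char) : Nat × Char :=
  if x.1 < b.1 ∨ (x.1 = b.1 ∧ x.2 < b.2) then x else b

-- _translateWord: w[:i] and w[i+1:] are List.take i / List.drop (i+1) — exact for this
-- in-range non-negative index i < w.length (Python slice with such bounds)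
def pvTranslateWord (w : List Char) : List Char :=
  match [pvOcc 'a' 'A' 2 0 0 w, pvOcc 'o' 'O' 2 0 0 w, pvOcc 'u' 'U' 2 0 0 w].filterMap id with
  | [] => w
  | h :: t =>
    let m := t.foldl pvLexMin h
    w.take m.1 ++ [pvUmlaut m.2] ++ w.drop (m.1 + 1)

def translateToHeavyMetalSplitted_alt (s : String) : String :=
  String.mk (PySem.Chars.join [' '] ((PySem.Chars.splitOn s.toList [' ']).map pvTranslateWord))

-- ===== PRECONDITION & SPEC =====
def Spec_translateToHeavyMetalSplitted (s : String) (out : String) : Prop := out = translateToHeavyMetalSplitted_alt s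
instance (s : String) (out : String) : Decidable (Spec_translateToHeavyMetalSplitted s out) := by unfold Spec_translateToHeavyMetalSplitted; infer_instance

-- ===== CLAIM (what is proved, stated in full; the proofs are below) =====
def Claim_equal_translateToHeavyMetalSplitted : Prop := ∀ (s : String), Dom_translateToHeavyMetalSplitted s → Spec_translateToHeavyMetalSplitted s (translateToHeavyMetalSplitted s)

-- ===== LEMMAS AND PROOFS =====

-- A's loop, as the list of characters it appends from a given state (out dropped from the state)
def pvRunA (cA cO cU : Int) (tr : Bool) : List Char → List Char
  | [] => []
  | c :: cs =>
    if tr = false ∧ (c = 'a' ∨ c = 'A') then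
      if cA + 1 = 2 then (if c = 'a' then 'ä' else 'Ä') :: pvRunA (cA + 1) cO cU true cs
      else c :: pvRunA (cA + 1) cO cU tr cs
    else if tr = false ∧ (c = 'o' ∨ c = 'O') then
      if cO + 1 = 2 then (if c = 'o' then 'ö' else 'Ö') :: pvRunA cA (cO + 1) cU true cs
      else c :: pvRunA cA (cO + 1) cU tr cs
    else if tr = false ∧ (c = 'u' ∨ c = 'U') then
      if cU + 1 = 2 then (if c = 'u' then 'ü' else 'Ü') :: pvRunA cA cO (cU + 1) true cs
      else c :: pvRunA cA cO (cU + 1) tr cs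
    else
      if c = ' ' then c :: pvRunA 0 0 0 false cs
      else c :: pvRunA cA cO cU tr cs

theorem pvFoldA_out (l : List Char) : ∀ (cA cO cU : Int) (tr : Bool) (out : List Char),
    (l.foldl pvStepA (cA, cO, cU, tr, out)).2.2.2.2 = out ++ pvRunA cA cO cU tr l := by
  induction l with
  | nil => intro cA cO cU tr out; simp [pvRunA]
  | cons c cs ih =>
    intro cA cO cU tr out
    simp only [List.foldl_cons, pvStepA, pvRunA]
    split_ifs <;> simp [ih]

-- clean recursion equivalent to PySem.Chars.splitOn · [' ']; `pre` is the current word so far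
def pvSplit (pre : List Char) : List Char → List (List Char)
  | [] => [pre]
  | c :: cs => if c = ' ' then pre :: pvSplit [] cs else pvSplit (pre ++ [c]) cs

theorem pvSplitGo_eq (l : List Char) : ∀ (fuel : Nat) (pre : List Char) (acc : List (List Char)),
    l.length < fuel →
    PySem.Chars.splitOn.go [' '] fuel l pre.reverse acc = acc.reverse ++ pvSplit pre l := by
  induction l with
  | nil =>
    intro fuel pre acc h
    obtain ⟨f, rfl⟩ := Nat.exists_eq_succ_of_ne_zero (by omega : fuel ≠ 0)
    simp [PySem.Chars.splitOn.go, pvSplit]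
  | cons c cs ih =>
    intro fuel pre acc h
    obtain ⟨f, rfl⟩ := Nat.exists_eq_succ_of_ne_zero (by omega : fuel ≠ 0)
    by_cases hc : c = ' '
    · subst hc
      rw [show PySem.Chars.splitOn.go [' '] (f + 1) (' ' :: cs) pre.reverse acc =
            PySem.Chars.splitOn.go [' '] f cs [] (pre.reverse.reverse :: acc) by
          simp [PySem.Chars.splitOn.go]]
      have := ih f [] (pre.reverse.reverse :: acc) (by simpa using h)
      simp only [List.reverse_nil] at this
      rw [this]
      simp [pvSplit]
    · rw [show PySem.Chars.splitOn.go [' '] (f + 1) (c :: cs) pre.reverse acc =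
            PySem.Chars.splitOn.go [' '] f cs (c :: pre.reverse) acc by
          rw [PySem.Chars.splitOn.go]
          simp only [List.isPrefixOf, List.cons.injEq, Bool.and_eq_true, decide_eq_true_eq]
          split_ifs with h'
          · simp only [beq_iff_eq, Bool.and_eq_true, decide_eq_true_eq] at h'
            exact absurd h'.1.symm hc
          · rfl]
      have := ih f (pre ++ [c]) acc (by simpa using h)
      simp only [List.reverse_append, List.reverse_cons, List.reverse_nil, List.nil_append,
        List.singleton_append] at this
      rw [this]
      simp [pvSplit, hc]

theorem pvSplitOn_eq (l : List Char) : PySem.Chars.splitOn l [' '] = pvSplit [] l := by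
  have := pvSplitGo_eq l (l.length + 1) [] [] (Nat.lt_succ_self _)
  simpa [PySem.Chars.splitOn] using this

theorem pvSplit_ne_nil (l : List Char) : ∀ pre, pvSplit pre l ≠ [] := by
  induction l with
  | nil => intro pre; simp [pvSplit]
  | cons c cs ih => intro pre; by_cases hc : c = ' ' <;> simp [pvSplit, hc, ih]

theorem pvSplit_no_space (w : List Char) (hw : ' ' ∉ w) : ∀ pre, pvSplit pre w = [pre ++ w] := by
  induction w with
  | nil => intro pre; simp [pvSplit]
  | cons c cs ih =>
    intro pre
    have hc : c ≠ ' ' := fun h => hw (h ▸ List.mem_cons_self)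
    have hcs : ' ' ∉ cs := fun h => hw (List.mem_cons_of_mem _ h)
    simp [pvSplit, hc, ih hcs]

theorem pvSplit_word_space (w : List Char) (hw : ' ' ∉ w) (rest : List Char) :
    ∀ pre, pvSplit pre (w ++ ' ' :: rest) = (pre ++ w) :: pvSplit [] rest := by
  induction w with
  | nil => intro pre; simp [pvSplit]
  | cons c cs ih =>
    intro pre
    have hc : c ≠ ' ' := fun h => hw (h ▸ List.mem_cons_self)
    have hcs : ' ' ∉ cs := fun h => hw (List.mem_cons_of_mem _ h)
    simp [pvSplit, hc, ih hcs]

-- once translated, the rest of a space-free word passes through unchanged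
theorem pvRunA_true (w : List Char) (hw : ' ' ∉ w) (cA cO cU : Int) :
    pvRunA cA cO cU true w = w := by
  induction w generalizing cA cO cU with
  | nil => simp [pvRunA]
  | cons c cs ih =>
    have hc : c ≠ ' ' := fun h => hw (h ▸ List.mem_cons_self)
    have hcs : ' ' ∉ cs := fun h => hw (List.mem_cons_of_mem _ h)
    simp [pvRunA, hc, ih hcs]

theorem pvRunA_true_space (w : List Char) (hw : ' ' ∉ w) (rest : List Char) (cA cO cU : Int) :
    pvRunA cA cO cU true (w ++ ' ' :: rest) = w ++ ' ' :: pvRunA 0 0 0 false rest := by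
  induction w generalizing cA cO cU with
  | nil => simp [pvRunA]
  | cons c cs ih =>
    have hc : c ≠ ' ' := fun h => hw (h ▸ List.mem_cons_self)
    have hcs : ' ' ∉ cs := fun h => hw (List.mem_cons_of_mem _ h)
    simp [pvRunA, hc, ih hcs]

theorem pvRunA_false_space (w : List Char) (hw : ' ' ∉ w) (rest : List Char) :
    ∀ (cA cO cU : Int),
    pvRunA cA cO cU false (w ++ ' ' :: rest) = pvRunA cA cO cU false w ++ ' ' :: pvRunA 0 0 0 false rest := by
  induction w with
  | nil => intro cA cO cU; simp [pvRunA]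
  | cons c cs ih =>
    intro cA cO cU
    have hc : c ≠ ' ' := fun h => hw (h ▸ List.mem_cons_self)
    have hcs : ' ' ∉ cs := fun h => hw (List.mem_cons_of_mem _ h)
    simp only [List.cons_append, pvRunA]
    split_ifs <;>
      simp [ih hcs, pvRunA_true_space cs hcs, pvRunA_true cs hcs]

-- B's combiner, factored for the proofs: best hit of the three families, then the substitution
def pvBest (x y z : Option (Nat × Char)) : Option (Nat × Char) :=
  match [x, y, z].filterMap id with
  | [] => none
  | h :: t => some (t.foldl pvLexMin h)

def pvApply (w : List Char) : Option (Nat × Char) → List Char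
  | none => w
  | some m => w.take m.1 ++ [pvUmlaut m.2] ++ w.drop (m.1 + 1)

theorem pvTranslateWord_eq (w : List Char) :
    pvTranslateWord w =
      pvApply w (pvBest (pvOcc 'a' 'A' 2 0 0 w) (pvOcc 'o' 'O' 2 0 0 w) (pvOcc 'u' 'U' 2 0 0 w)) := by
  unfold pvTranslateWord pvBest
  cases h : [pvOcc 'a' 'A' 2 0 0 w, pvOcc 'o' 'O' 2 0 0 w, pvOcc 'u' 'U' 2 0 0 w].filterMap id <;>
    simp [h, pvApply]

def pvShift (r : Nat × Char) : Nat × Char := (r.1 + 1, r.2)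

theorem pvOcc_shift (cs : List Char) : ∀ (lo up : Char) (need cnt i : Nat),
    pvOcc lo up need cnt (i + 1) cs = (pvOcc lo up need cnt i cs).map pvShift := by
  induction cs with
  | nil => intro lo up need cnt i; simp [pvOcc]
  | cons c cs ih =>
    intro lo up need cnt i
    simp only [pvOcc]
    split_ifs <;> simp [ih, pvShift]

theorem pvBest_shift (x y z : Option (Nat × Char)) :
    pvBest (x.map pvShift) (y.map pvShift) (z.map pvShift) = (pvBest x y z).map pvShift := by
  rcases x with _ | a <;> rcases y with _ | b <;> rcases z with _ | d <;>
    simp only [Option.map, pvBest, List.filterMap, Option.map_some, Option.map_none] <;>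
    simp [pvLexMin, pvShift] <;>
    split_ifs <;> simp_all <;> omega

theorem pvBest_zero (c : Char) (y z : Option (Nat × Char)) :
    pvBest (some (0, c)) (y.map pvShift) (z.map pvShift) = some (0, c) := by
  rcases y with _ | b <;> rcases z with _ | d <;>
    simp only [Option.map, pvBest, List.filterMap, Option.map_some, Option.map_none] <;>
    simp [pvLexMin, pvShift]

theorem pvApply_shift (c : Char) (cs : List Char) (b : Option (Nat × Char)) :
    pvApply (c :: cs) (b.map pvShift) = c :: pvApply cs b := by
  rcases b with _ | m <;> simp [pvApply, pvShift]


theorem pvBest_mid_zero (x : Option (Nat × Char)) (c : Char) (z : Option (Nat × Char)) :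
    pvBest (x.map pvShift) (some (0, c)) (z.map pvShift) = some (0, c) := by
  rcases x with _ | a <;> rcases z with _ | d <;>
    simp only [Option.map, pvBest, List.filterMap, Option.map_some, Option.map_none] <;>
    simp [pvLexMin, pvShift] <;> split_ifs <;> simp <;> omega

theorem pvBest_last_zero (x y : Option (Nat × Char)) (c : Char) :
    pvBest (x.map pvShift) (y.map pvShift) (some (0, c)) = some (0, c) := by
  rcases x with _ | a <;> rcases y with _ | b <;>
    simp only [Option.map, pvBest, List.filterMap, Option.map_some, Option.map_none] <;>
    simp [pvLexMin, pvShift] <;> split_ifs <;> simp <;> omega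

theorem pvFirstSpace (l : List Char) (h : ' ' ∈ l) :
    ∃ w rest, ' ' ∉ w ∧ l = w ++ ' ' :: rest := by
  induction l with
  | nil => cases h
  | cons c cs ih =>
    by_cases hc : c = ' '
    · exact ⟨[], cs, by simp, by simp [hc]⟩
    · obtain ⟨w, rest, hw, hrw⟩ := ih (by cases h with
        | head => exact absurd rfl hc
        | tail _ h => exact h)
      exact ⟨c :: w, rest, by simp [hw]; exact fun h => hc h.symm, by simp [hrw]⟩

-- the heart: A's word phase from counters a,o,u ∈ {0,1} produces B's find-then-substitute result
theorem pvWord (w : List Char) : ∀ (a o u : Nat), ' ' ∉ w → a ≤ 1 → o ≤ 1 → u ≤ 1 →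
    pvRunA (a : Int) (o : Int) (u : Int) false w =
      pvApply w (pvBest (pvOcc 'a' 'A' 2 a 0 w) (pvOcc 'o' 'O' 2 o 0 w) (pvOcc 'u' 'U' 2 u 0 w)) := by
  induction w with
  | nil => intro a o u _ _ _ _; simp [pvRunA, pvOcc, pvBest, pvApply]
  | cons c cs ih =>
    intro a o u hw ha ho hu
    have hc : c ≠ ' ' := fun h => hw (h ▸ List.mem_cons_self)
    have hcs : ' ' ∉ cs := fun h => hw (List.mem_cons_of_mem _ h)
    by_cases hA : c = 'a' ∨ c = 'A'
    · have hno : ¬ (c = 'o' ∨ c = 'O') := by rcases hA with rfl | rfl <;> simp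
      have hnu : ¬ (c = 'u' ∨ c = 'U') := by rcases hA with rfl | rfl <;> simp
      interval_cases a
      · -- counterA becomes 1, no translation at c
        have h2 : ¬ ((0 : Int) + 1 = 2) := by norm_num
        rw [show pvRunA ((0:Nat) : Int) (o : Int) (u : Int) false (c :: cs) =
              c :: pvRunA ((1:Nat) : Int) (o : Int) (u : Int) false cs by
            simp [pvRunA, hA, hno, hnu, h2]]
        rw [ih 1 o u hcs (le_refl 1) ho hu]
        rw [show pvOcc 'a' 'A' 2 0 0 (c :: cs) = (pvOcc 'a' 'A' 2 1 0 cs).map pvShift by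
            simp [pvOcc, hA]; rw [show (1:Nat) = 0 + 1 by rfl, pvOcc_shift]]
        rw [show pvOcc 'o' 'O' 2 o 0 (c :: cs) = (pvOcc 'o' 'O' 2 o 0 cs).map pvShift by
            simp [pvOcc, hno]; rw [show (1:Nat) = 0 + 1 by rfl, pvOcc_shift]]
        rw [show pvOcc 'u' 'U' 2 u 0 (c :: cs) = (pvOcc 'u' 'U' 2 u 0 cs).map pvShift by
            simp [pvOcc, hnu]; rw [show (1:Nat) = 0 + 1 by rfl, pvOcc_shift]]
        rw [pvBest_shift, pvApply_shift]
      · -- counterA becomes 2: translate here, rest of the word passes through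
        have h2 : ((1:Nat) : Int) + 1 = 2 := by norm_num
        rw [show pvRunA ((1:Nat) : Int) (o : Int) (u : Int) false (c :: cs) =
              (if c = 'a' then 'ä' else 'Ä') :: pvRunA 2 (o : Int) (u : Int) true cs by
            simp [pvRunA, hA, hno, hnu, h2]]
        rw [pvRunA_true cs hcs]
        rw [show pvOcc 'a' 'A' 2 1 0 (c :: cs) = some (0, c) by simp [pvOcc, hA]]
        rw [show pvOcc 'o' 'O' 2 o 0 (c :: cs) = (pvOcc 'o' 'O' 2 o 0 cs).map pvShift by
            simp [pvOcc, hno]; rw [show (1:Nat) = 0 + 1 by rfl, pvOcc_shift]]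
        rw [show pvOcc 'u' 'U' 2 u 0 (c :: cs) = (pvOcc 'u' 'U' 2 u 0 cs).map pvShift by
            simp [pvOcc, hnu]; rw [show (1:Nat) = 0 + 1 by rfl, pvOcc_shift]]
        rw [pvBest_zero]
        rcases hA with rfl | rfl <;> simp [pvApply, pvUmlaut]
    · by_cases hO : c = 'o' ∨ c = 'O'
      · have hnu : ¬ (c = 'u' ∨ c = 'U') := by rcases hO with rfl | rfl <;> simp
        interval_cases o
        · have h2 : ¬ ((0 : Int) + 1 = 2) := by norm_num
          rw [show pvRunA (a : Int) ((0:Nat) : Int) (u : Int) false (c :: cs) =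
                c :: pvRunA (a : Int) ((1:Nat) : Int) (u : Int) false cs by
              simp [pvRunA, hA, hO, hnu, h2]]
          rw [ih a 1 u hcs ha (le_refl 1) hu]
          rw [show pvOcc 'a' 'A' 2 a 0 (c :: cs) = (pvOcc 'a' 'A' 2 a 0 cs).map pvShift by
              simp [pvOcc, hA]; rw [show (1:Nat) = 0 + 1 by rfl, pvOcc_shift]]
          rw [show pvOcc 'o' 'O' 2 0 0 (c :: cs) = (pvOcc 'o' 'O' 2 1 0 cs).map pvShift by
              simp [pvOcc, hO]; rw [show (1:Nat) = 0 + 1 by rfl, pvOcc_shift]]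
          rw [show pvOcc 'u' 'U' 2 u 0 (c :: cs) = (pvOcc 'u' 'U' 2 u 0 cs).map pvShift by
              simp [pvOcc, hnu]; rw [show (1:Nat) = 0 + 1 by rfl, pvOcc_shift]]
          rw [pvBest_shift, pvApply_shift]
        · have h2 : ((1:Nat) : Int) + 1 = 2 := by norm_num
          rw [show pvRunA (a : Int) ((1:Nat) : Int) (u : Int) false (c :: cs) =
                (if c = 'o' then 'ö' else 'Ö') :: pvRunA (a : Int) 2 (u : Int) true cs by
              simp [pvRunA, hA, hO, hnu, h2]]
          rw [pvRunA_true cs hcs]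
          rw [show pvOcc 'o' 'O' 2 1 0 (c :: cs) = some (0, c) by simp [pvOcc, hO]]
          rw [show pvOcc 'a' 'A' 2 a 0 (c :: cs) = (pvOcc 'a' 'A' 2 a 0 cs).map pvShift by
              simp [pvOcc, hA]; rw [show (1:Nat) = 0 + 1 by rfl, pvOcc_shift]]
          rw [show pvOcc 'u' 'U' 2 u 0 (c :: cs) = (pvOcc 'u' 'U' 2 u 0 cs).map pvShift by
              simp [pvOcc, hnu]; rw [show (1:Nat) = 0 + 1 by rfl, pvOcc_shift]]
          rw [show pvBest ((pvOcc 'a' 'A' 2 a 0 cs).map pvShift) (some (0, c))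
                ((pvOcc 'u' 'U' 2 u 0 cs).map pvShift) = some (0, c) from pvBest_mid_zero ..]
          rcases hO with rfl | rfl <;> simp [pvApply, pvUmlaut]
      · by_cases hU : c = 'u' ∨ c = 'U'
        · interval_cases u
          · have h2 : ¬ ((0 : Int) + 1 = 2) := by norm_num
            rw [show pvRunA (a : Int) (o : Int) ((0:Nat) : Int) false (c :: cs) =
                  c :: pvRunA (a : Int) (o : Int) ((1:Nat) : Int) false cs by
                simp [pvRunA, hA, hO, hU, h2]]
            rw [ih a o 1 hcs ha ho (le_refl 1)]
            rw [show pvOcc 'a' 'A' 2 a 0 (c :: cs) = (pvOcc 'a' 'A' 2 a 0 cs).map pvShift by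
                simp [pvOcc, hA]; rw [show (1:Nat) = 0 + 1 by rfl, pvOcc_shift]]
            rw [show pvOcc 'o' 'O' 2 o 0 (c :: cs) = (pvOcc 'o' 'O' 2 o 0 cs).map pvShift by
                simp [pvOcc, hO]; rw [show (1:Nat) = 0 + 1 by rfl, pvOcc_shift]]
            rw [show pvOcc 'u' 'U' 2 0 0 (c :: cs) = (pvOcc 'u' 'U' 2 1 0 cs).map pvShift by
                simp [pvOcc, hU]; rw [show (1:Nat) = 0 + 1 by rfl, pvOcc_shift]]
            rw [pvBest_shift, pvApply_shift]
          · have h2 : ((1:Nat) : Int) + 1 = 2 := by norm_num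
            rw [show pvRunA (a : Int) (o : Int) ((1:Nat) : Int) false (c :: cs) =
                  (if c = 'u' then 'ü' else 'Ü') :: pvRunA (a : Int) (o : Int) 2 true cs by
                simp [pvRunA, hA, hO, hU, h2]]
            rw [pvRunA_true cs hcs]
            rw [show pvOcc 'u' 'U' 2 1 0 (c :: cs) = some (0, c) by simp [pvOcc, hU]]
            rw [show pvOcc 'a' 'A' 2 a 0 (c :: cs) = (pvOcc 'a' 'A' 2 a 0 cs).map pvShift by
                simp [pvOcc, hA]; rw [show (1:Nat) = 0 + 1 by rfl, pvOcc_shift]]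
            rw [show pvOcc 'o' 'O' 2 o 0 (c :: cs) = (pvOcc 'o' 'O' 2 o 0 cs).map pvShift by
                simp [pvOcc, hO]; rw [show (1:Nat) = 0 + 1 by rfl, pvOcc_shift]]
            rw [show pvBest ((pvOcc 'a' 'A' 2 a 0 cs).map pvShift)
                  ((pvOcc 'o' 'O' 2 o 0 cs).map pvShift) (some (0, c)) = some (0, c) from
                pvBest_last_zero ..]
            rcases hU with rfl | rfl <;> simp [pvApply, pvUmlaut]
        · -- plain character (not a vowel, not a space): everything shifts by one
          rw [show pvRunA (a : Int) (o : Int) (u : Int) false (c :: cs) =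
                c :: pvRunA (a : Int) (o : Int) (u : Int) false cs by
              simp [pvRunA, hA, hO, hU, hc]]
          rw [ih a o u hcs ha ho hu]
          rw [show pvOcc 'a' 'A' 2 a 0 (c :: cs) = (pvOcc 'a' 'A' 2 a 0 cs).map pvShift by
              simp [pvOcc, hA]; rw [show (1:Nat) = 0 + 1 by rfl, pvOcc_shift]]
          rw [show pvOcc 'o' 'O' 2 o 0 (c :: cs) = (pvOcc 'o' 'O' 2 o 0 cs).map pvShift by
              simp [pvOcc, hO]; rw [show (1:Nat) = 0 + 1 by rfl, pvOcc_shift]]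
          rw [show pvOcc 'u' 'U' 2 u 0 (c :: cs) = (pvOcc 'u' 'U' 2 u 0 cs).map pvShift by
              simp [pvOcc, hU]; rw [show (1:Nat) = 0 + 1 by rfl, pvOcc_shift]]
          rw [pvBest_shift, pvApply_shift]

-- the whole string: A's run = join of B's per-word translations
theorem pvMain : ∀ (n : Nat) (l : List Char), l.length ≤ n →
    pvRunA 0 0 0 false l = PySem.Chars.join [' '] ((pvSplit [] l).map pvTranslateWord) := by
  intro n
  induction n with
  | zero =>
    intro l hl
    rw [List.length_eq_zero_iff.mp (Nat.le_zero.mp hl)]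
    simp [pvRunA, pvSplit, pvTranslateWord, pvOcc, PySem.Chars.join_singleton]
  | succ n ih =>
    intro l hl
    by_cases hsp : ' ' ∈ l
    · obtain ⟨w, rest, hw, rfl⟩ : ∃ w rest, ' ' ∉ w ∧ l = w ++ ' ' :: rest := by
        exact pvFirstSpace l hsp
      rw [pvRunA_false_space w hw rest 0 0 0]
      have hword := pvWord w 0 0 0 hw (by norm_num) (by norm_num) (by norm_num)
      simp only [Nat.cast_zero] at hword
      rw [hword]
      rw [pvSplit_word_space w hw rest []]
      have hrest : rest.length ≤ n := by
        simp only [List.length_append, List.length_cons] at hl; omega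
      rw [ih rest hrest]
      obtain ⟨q, t, hq⟩ : ∃ q t, pvSplit [] rest = q :: t := by
        cases h : pvSplit [] rest with
        | nil => exact absurd h (pvSplit_ne_nil rest [])
        | cons q t => exact ⟨q, t, rfl⟩
      rw [hq]
      simp only [List.nil_append, List.map_cons, PySem.Chars.join_cons_cons]
      rw [pvTranslateWord_eq w]
      rw [List.append_assoc, List.singleton_append]
    · rw [pvSplit_no_space l hsp []]
      simp only [List.nil_append, List.map_cons, List.map_nil, PySem.Chars.join_singleton]
      have hword := pvWord l 0 0 0 hsp (by norm_num) (by norm_num) (by norm_num)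
      simp only [Nat.cast_zero] at hword
      rw [hword, pvTranslateWord_eq l]

-- ===== VERDICT (by name: the statement is the Claim_ definition above) =====
theorem translateToHeavyMetalSplitted_spec : Claim_equal_translateToHeavyMetalSplitted := by
  intro s _
  unfold Spec_translateToHeavyMetalSplitted translateToHeavyMetalSplitted translateToHeavyMetalSplitted_alt
  rw [pvFoldA_out, pvSplitOn_eq, pvMain s.toList.length s.toList (le_refl _)]
  simp
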